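-- pv_equiv track=rewrite | github.com/Sangeethar-mora/python_practice | loops/loops22.py | min_max_number
-- ===== SOURCE A (Python) =====
-- def min_max_number(num):
--     if num < 0:
--         num -= num + num
--     maximum_number = 0
--     minimum_number = 0
--     while num > 0:
--         a = num % 10
--         if a > maximum_number:
--             maximum_number = a
--         if a < minimum_number:
--             minimum_number = a
--         num = num//10
--     return maximum_number, minimum_number
-- ===== SOURCE B (Python) =====
-- def min_max_number(num):
--     hi = lo = 0
--     for c in str(abs(num)):
--         d = int(c)
--         hi = max(hi, d)
--         lo = min(lo, d)
--     return hi, lo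
-- ===== Notes on version B (the rewrite author's own statement) =====
-- stated objective: idiomatic
-- what changed: B makes one pass over the decimal string of abs(num), updating running extrema with the built-in max/min, instead of A's arithmetic mod/floordiv while-loop with manual if-comparisons.
import Mathlib
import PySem

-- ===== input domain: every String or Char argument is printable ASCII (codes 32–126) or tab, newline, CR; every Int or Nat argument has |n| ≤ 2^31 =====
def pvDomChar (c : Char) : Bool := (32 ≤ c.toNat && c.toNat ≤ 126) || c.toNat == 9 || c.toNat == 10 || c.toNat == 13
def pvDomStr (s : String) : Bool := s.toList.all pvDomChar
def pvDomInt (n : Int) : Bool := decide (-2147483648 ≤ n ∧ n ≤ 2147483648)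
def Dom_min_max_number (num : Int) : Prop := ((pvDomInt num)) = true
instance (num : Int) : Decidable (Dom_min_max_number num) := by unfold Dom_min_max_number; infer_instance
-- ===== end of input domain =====

-- B makes one pass over the decimal string of abs(num) with built-in max/min running
-- extrema, replacing A's arithmetic mod/floordiv loop with manual if-comparisons (objective: idiomatic).

-- termination helper for the port of A's while loop
theorem pvFdiv10_lt (num : Int) (h : 0 < num) : (PySem.Int.floordiv num 10).toNat < num.toNat := by
  have h1 : PySem.Int.floordiv num 10 = num / 10 :=
    Int.fdiv_eq_ediv_of_nonneg num (by norm_num)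
  rw [h1]; omega

-- ===== PORT A =====
def minMaxLoopA (num mx mn : Int) : Int × Int :=
  if h : 0 < num then
    let a := PySem.Int.mod num 10
    minMaxLoopA (PySem.Int.floordiv num 10)
      (if a > mx then a else mx) (if a < mn then a else mn)
  else (mx, mn)
termination_by num.toNat
decreasing_by exact pvFdiv10_lt num h

def min_max_number (num : Int) : Int × Int :=
  let num' := if num < 0 then num - (num + num) else num
  minMaxLoopA num' 0 0

-- ===== PORT B =====
-- hi = lo = 0; for c in str(abs(num)): d = int(c); hi = max(hi, d); lo = min(lo, d)
-- int(c) is ported as c.toNat - 48: exact here, since str(abs(num)) consists of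
-- decimal digit characters only.
def min_max_number_alt (num : Int) : Int × Int :=
  (PySem.Int.toChars (Int.natAbs num : Int)).foldl
    (fun (st : Int × Int) c =>
      let d : Int := (c.toNat : Int) - 48
      (max st.1 d, min st.2 d))
    (0, 0)

-- ===== PRECONDITION & SPEC =====
def Spec_min_max_number (num : Int) (out : Int × Int) : Prop := out = min_max_number_alt num
instance (num : Int) (out : Int × Int) : Decidable (Spec_min_max_number num out) := by unfold Spec_min_max_number; infer_instance

-- ===== CLAIM (what is proved, stated in full; the proofs are below) =====
def Claim_equal_min_max_number : Prop := ∀ (num : Int), Dom_min_max_number num → Spec_min_max_number num (min_max_number num)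

-- ===== LEMMAS AND PROOFS =====

theorem pvToDigitsCore_eq (f : Nat) : ∀ (n : Nat) (ds : List Char), n ≠ 0 → n < 10 ^ f →
    Nat.toDigitsCore 10 f n ds = ((Nat.digits 10 n).map Nat.digitChar).reverse ++ ds := by
  induction f with
  | zero => intro n ds hn hf; simp at hf; omega
  | succ f ih =>
    intro n ds hn hf
    rw [Nat.toDigitsCore]
    have hd : Nat.digits 10 n = n % 10 :: Nat.digits 10 (n / 10) :=
      Nat.digits_def' (by norm_num) (Nat.pos_of_ne_zero hn)
    by_cases h0 : n / 10 = 0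
    · simp [h0, hd, Nat.digits_zero]
    · have hlt : n / 10 < 10 ^ f := by
        rw [pow_succ] at hf
        exact Nat.div_lt_of_lt_mul (by omega)
      simp only [h0, if_false]
      rw [ih (n / 10) _ h0 hlt, hd]
      simp

theorem pvToDigits_eq (n : Nat) (hn : n ≠ 0) :
    Nat.toDigits 10 n = ((Nat.digits 10 n).map Nat.digitChar).reverse := by
  have h : n < 10 ^ (n + 1) :=
    lt_of_lt_of_le (Nat.lt_pow_self (by norm_num)) (Nat.pow_le_pow_right (by norm_num) (by omega))
  simpa using pvToDigitsCore_eq (n + 1) n [] hn h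

theorem pvDigitChar_toNat : ∀ d : Nat, d < 10 → (Nat.digitChar d).toNat = 48 + d := by decide

theorem pvFoldlMaxShift (x : Int) (l : List Int) : ∀ a : Int,
    max (l.foldl max a) x = l.foldl max (max a x) := by
  induction l with
  | nil => intro a; rfl
  | cons y l ih => intro a; simp only [List.foldl]; rw [ih, max_right_comm]

theorem pvFoldlMinShift (x : Int) (l : List Int) : ∀ a : Int,
    min (l.foldl min a) x = l.foldl min (min a x) := by
  induction l with
  | nil => intro a; rfl
  | cons y l ih => intro a; simp only [List.foldl]; rw [ih, min_right_comm]

theorem pvFoldlMaxReverse (l : List Int) (a : Int) :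
    l.reverse.foldl max a = l.foldl max a := by
  induction l generalizing a with
  | nil => rfl
  | cons x l ih =>
    simp only [List.reverse_cons, List.foldl_append, List.foldl, ih]
    rw [pvFoldlMaxShift]

theorem pvFoldlMinReverse (l : List Int) (a : Int) :
    l.reverse.foldl min a = l.foldl min a := by
  induction l generalizing a with
  | nil => rfl
  | cons x l ih =>
    simp only [List.reverse_cons, List.foldl_append, List.foldl, ih]
    rw [pvFoldlMinShift]

-- the pair-state fold splits into the two independent extremum folds
theorem pvFoldPair (l : List Int) : ∀ (a b : Int),
    l.foldl (fun (st : Int × Int) d => (max st.1 d, min st.2 d)) (a, b)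
      = (l.foldl max a, l.foldl min b) := by
  induction l with
  | nil => intro a b; rfl
  | cons x l ih => intro a b; simp only [List.foldl]; rw [ih]

theorem pvIteMax (a m : Int) : (if a > m then a else m) = max m a := by
  rw [max_def]; split_ifs <;> omega

theorem pvIteMin (a m : Int) : (if a < m then a else m) = min m a := by
  rw [min_def]; split_ifs <;> omega

theorem pvLoopA_eq (k : Nat) : ∀ (num mx mn : Int), num.toNat = k → 0 ≤ num →
    minMaxLoopA num mx mn =
      (((Nat.digits 10 num.toNat).map (fun d => Int.ofNat d)).foldl max mx,
       ((Nat.digits 10 num.toNat).map (fun d => Int.ofNat d)).foldl min mn) := by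
  induction k using Nat.strong_induction_on with
  | _ k ih =>
    intro num mx mn hk hnn
    rw [minMaxLoopA]
    by_cases h : 0 < num
    · simp only [h, dif_pos]
      have hmod : PySem.Int.mod num 10 = ((num.toNat % 10 : Nat) : Int) := by
        simp only [PySem.Int.mod, Int.fmod_eq_emod]
        norm_num
        omega
      have hdiv : PySem.Int.floordiv num 10 = ((num.toNat / 10 : Nat) : Int) := by
        simp only [PySem.Int.floordiv, Int.fdiv_eq_ediv_of_nonneg num
          (by norm_num : (0:Int) ≤ 10)]
        omega
      have hlt : (PySem.Int.floordiv num 10).toNat < k := hk ▸ pvFdiv10_lt num h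
      have hrec := ih _ hlt (PySem.Int.floordiv num 10)
        (if PySem.Int.mod num 10 > mx then PySem.Int.mod num 10 else mx)
        (if PySem.Int.mod num 10 < mn then PySem.Int.mod num 10 else mn) rfl
        (by rw [hdiv]; positivity)
      rw [hrec]
      have hd : Nat.digits 10 num.toNat = num.toNat % 10 :: Nat.digits 10 (num.toNat / 10) :=
        Nat.digits_def' (by norm_num) (by omega)
      have htn : (PySem.Int.floordiv num 10).toNat = num.toNat / 10 := by rw [hdiv]; omega
      rw [htn, hd]
      simp only [List.map, List.foldl]
      rw [hmod, pvIteMax, pvIteMin]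
      simp [Int.ofNat_eq_natCast]
    · simp only [h, dif_neg, not_false_iff]
      have : num.toNat = 0 := by omega
      rw [this]
      simp [Nat.digits_zero]

theorem pvAlt_eq (num : Int) : min_max_number_alt num =
      (((Nat.digits 10 num.natAbs).map (fun d => Int.ofNat d)).foldl max 0,
       ((Nat.digits 10 num.natAbs).map (fun d => Int.ofNat d)).foldl min 0) := by
  unfold min_max_number_alt
  have htc : PySem.Int.toChars (Int.natAbs num : Int) = Nat.toDigits 10 num.natAbs := by
    simp only [PySem.Int.toChars]
    rw [if_neg (by omega : ¬ ((num.natAbs : Int) < 0)), Int.toNat_natCast]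
  by_cases h0 : num.natAbs = 0
  · rw [htc, h0]
    norm_num [Nat.toDigits, Nat.toDigitsCore, Nat.digitChar, Nat.digits_zero]
    decide
  · rw [htc, pvToDigits_eq _ h0]
    show List.foldl
        (fun (st : Int × Int) (c : Char) =>
          (max st.1 ((c.toNat : Int) - 48), min st.2 ((c.toNat : Int) - 48)))
        (0, 0) ((List.map Nat.digitChar (Nat.digits 10 num.natAbs)).reverse) = _
    rw [← List.foldl_map (f := fun (c : Char) => ((c.toNat : Int) - 48))
        (g := fun (st : Int × Int) d => (max st.1 d, min st.2 d))]
    rw [List.map_reverse, List.map_map]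
    have hmapeq : (Nat.digits 10 num.natAbs).map ((fun c => (c.toNat : Int) - 48) ∘ Nat.digitChar)
        = (Nat.digits 10 num.natAbs).map (fun d => Int.ofNat d) := by
      apply List.map_congr_left
      intro d hd
      have : d < 10 := Nat.digits_lt_base (by norm_num) hd
      simp only [Function.comp, pvDigitChar_toNat d this, Int.ofNat_eq_natCast]
      omega
    rw [hmapeq, pvFoldPair, pvFoldlMaxReverse, pvFoldlMinReverse]

-- ===== VERDICT (by name: the statement is the Claim_ definition above) =====
theorem min_max_number_spec : Claim_equal_min_max_number := by
  intro num _
  unfold Spec_min_max_number min_max_number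
  have habs : (if num < 0 then num - (num + num) else num) = ((num.natAbs : Nat) : Int) := by
    split_ifs <;> omega
  rw [habs, pvAlt_eq,
    pvLoopA_eq ((num.natAbs : Int)).toNat _ 0 0 rfl (by positivity),
    Int.toNat_natCast]
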